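-- pv_equiv track=rewrite | github.com/AlexBridge69/Seminar-4-HW | main.py | get_list_from_low
-- ===== SOURCE A (Python) =====
-- def get_list_from_low(in_list, index_of_start_low):
--     list_from_low = list()
--     start_element = in_list[index_of_start_low]
--     list_from_low.append(start_element)
--     for i in range(index_of_start_low, len(in_list)):
--         if start_element < in_list[i]:
--             list_from_low.append(in_list[i])
--             start_element = in_list[i]
--     return list_from_low
-- ===== SOURCE B (Python) =====
-- def get_list_from_low(in_list, index_of_start_low):
--     # Two-pass version: materialise the elements the forward range visits,
--     # build a prefix-maximum table, then keep each element that beats the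
--     # prefix maximum before it.
--     seq = [in_list[i] for i in range(index_of_start_low, len(in_list))]
--     pm = []
--     m = seq[0]
--     for x in seq:
--         m = max(m, x)
--         pm.append(m)
--     return [seq[0]] + [x for x, p in zip(seq[1:], pm) if x > p]
-- ===== Notes on version B (the rewrite author's own statement) =====
-- stated objective: alternative
-- what changed: Replaces A's fused greedy scan (a running start_element updated in place) with two passes: materialise the visited element sequence, build a prefix-maximum table, then filter each later element against the prefix maximum before it.
import Mathlib
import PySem

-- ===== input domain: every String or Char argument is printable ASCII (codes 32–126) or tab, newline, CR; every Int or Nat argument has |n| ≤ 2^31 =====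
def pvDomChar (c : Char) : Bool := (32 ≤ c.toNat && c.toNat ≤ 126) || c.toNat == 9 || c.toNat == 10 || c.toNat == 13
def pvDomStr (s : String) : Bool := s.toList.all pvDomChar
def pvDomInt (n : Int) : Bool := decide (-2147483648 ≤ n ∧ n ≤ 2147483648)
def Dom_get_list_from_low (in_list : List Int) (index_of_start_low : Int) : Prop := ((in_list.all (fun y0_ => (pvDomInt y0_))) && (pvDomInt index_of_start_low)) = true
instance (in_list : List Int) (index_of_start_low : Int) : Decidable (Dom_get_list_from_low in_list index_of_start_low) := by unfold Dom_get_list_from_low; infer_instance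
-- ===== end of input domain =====

-- B replaces A's fused greedy scan by two passes (materialised element sequence, prefix-max
-- table, zip-filter); same cost, alternative structure.

-- ===== PORT A =====
def get_list_from_low (in_list : List Int) (index_of_start_low : Int) : List Int :=
  -- start_element = in_list[index_of_start_low]; total via default 0, exact under Pre_
  let s := PySem.List.pyGetD in_list index_of_start_low 0
  ((PySem.List.pyRange index_of_start_low (in_list.length : Int) 1).foldl
    (fun (acc : List Int × Int) i =>
      let x := PySem.List.pyGetD in_list i 0
      if acc.2 < x then (acc.1 ++ [x], x) else acc)
    ([s], s)).1

-- ===== PORT B =====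
def get_list_from_low_alt (in_list : List Int) (index_of_start_low : Int) : List Int :=
  -- seq = [in_list[i] for i in range(index_of_start_low, len(in_list))]
  let seq := (PySem.List.pyRange index_of_start_low (in_list.length : Int) 1).map
      (fun i => PySem.List.pyGetD in_list i 0)
  -- m = seq[0]; for x in seq: m = max(m, x); pm.append(m)
  let pm := (seq.foldl (fun (acc : List Int × Int) x =>
      (acc.1 ++ [max acc.2 x], max acc.2 x)) ([], PySem.List.pyGetD seq 0 0)).1
  -- [seq[0]] + [x for x, p in zip(seq[1:], pm) if x > p]
  [PySem.List.pyGetD seq 0 0] ++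
    (((seq.drop 1).zip pm).filter (fun p => p.2 < p.1)).map Prod.fst

-- ===== PRECONDITION & SPEC =====
-- exactly the inputs where in_list[index_of_start_low] does not raise IndexError
def Pre_get_list_from_low (in_list : List Int) (index_of_start_low : Int) : Prop :=
  PySem.Raise.InRange in_list.length index_of_start_low
instance (in_list : List Int) (index_of_start_low : Int) : Decidable (Pre_get_list_from_low in_list index_of_start_low) := by unfold Pre_get_list_from_low; infer_instance

def pvWitness_get_list_from_low : List Int × Int := ([3, 1, 4, 1, 5], -4)

def Spec_get_list_from_low (in_list : List Int) (index_of_start_low : Int) (out : List Int) : Prop := out = get_list_from_low_alt in_list index_of_start_low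
instance (in_list : List Int) (index_of_start_low : Int) (out : List Int) : Decidable (Spec_get_list_from_low in_list index_of_start_low out) := by unfold Spec_get_list_from_low; infer_instance

-- ===== CLAIM (what is proved, stated in full; the proofs are below) =====
def Claim_equal_get_list_from_low : Prop := ∀ (in_list : List Int) (index_of_start_low : Int), Dom_get_list_from_low in_list index_of_start_low → Pre_get_list_from_low in_list index_of_start_low → Spec_get_list_from_low in_list index_of_start_low (get_list_from_low in_list index_of_start_low)

-- ===== LEMMAS AND PROOFS =====

-- A's loop body on one element
def gstep (acc : List Int × Int) (x : Int) : List Int × Int :=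
  if acc.2 < x then (acc.1 ++ [x], x) else acc

-- prefix maxima of xs relative to a seed m
def pms : List Int → Int → List Int
  | [], _ => []
  | x :: xs, m => max m x :: pms xs (max m x)

theorem pm_fold (xs : List Int) (acc : List Int) (m : Int) :
    (xs.foldl (fun (a : List Int × Int) x => (a.1 ++ [max a.2 x], max a.2 x)) (acc, m)).1
      = acc ++ pms xs m := by
  induction xs generalizing acc m with
  | nil => simp [pms]
  | cons x xs ih => simp [List.foldl_cons, pms, ih]

theorem greedy_eq (xs : List Int) (m : Int) (acc : List Int) :
    (xs.foldl gstep (acc, m)).1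
      = acc ++ ((xs.zip (m :: pms xs m)).filter (fun p => p.2 < p.1)).map Prod.fst := by
  induction xs generalizing m acc with
  | nil => simp
  | cons x xs ih =>
    by_cases h : m < x
    · have hmax : max m x = x := max_eq_right (le_of_lt h)
      simp [List.foldl_cons, gstep, h, pms, hmax, ih]
    · have hmax : max m x = m := max_eq_left (le_of_not_gt h)
      simp [List.foldl_cons, gstep, h, pms, hmax, ih]

theorem main_eq (l : List Int) (idx : Int)
    (h1 : -(l.length : Int) ≤ idx) (h2 : idx < (l.length : Int)) :
    get_list_from_low l idx = get_list_from_low_alt l idx := by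
  unfold get_list_from_low get_list_from_low_alt
  set g : Int → Int := fun i => PySem.List.pyGetD l i 0 with hg
  show ((PySem.List.pyRange idx (l.length : Int) 1).foldl
      (fun (acc : List Int × Int) i =>
        let x := PySem.List.pyGetD l i 0
        if acc.2 < x then (acc.1 ++ [x], x) else acc)
      ([PySem.List.pyGetD l idx 0], PySem.List.pyGetD l idx 0)).1
    = [PySem.List.pyGetD ((PySem.List.pyRange idx (l.length : Int) 1).map g) 0 0] ++
      (((((PySem.List.pyRange idx (l.length : Int) 1).map g).drop 1).zip
        ((((PySem.List.pyRange idx (l.length : Int) 1).map g).foldl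
          (fun (acc : List Int × Int) x => (acc.1 ++ [max acc.2 x], max acc.2 x))
          ([], PySem.List.pyGetD ((PySem.List.pyRange idx (l.length : Int) 1).map g) 0 0)).1)).filter
            (fun p => p.2 < p.1)).map Prod.fst
  set s := PySem.List.pyGetD l idx 0 with hs
  -- A's fold over indices = fold of gstep over the mapped element sequence
  have hA : ((PySem.List.pyRange idx (l.length : Int) 1).foldl
      (fun (acc : List Int × Int) i =>
        let x := PySem.List.pyGetD l i 0
        if acc.2 < x then (acc.1 ++ [x], x) else acc) ([s], s))
      = (((PySem.List.pyRange idx (l.length : Int) 1).map g).foldl gstep ([s], s)) := by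
    rw [List.foldl_map]; rfl
  rw [hA]
  -- the element sequence is s :: t
  have hseq : (PySem.List.pyRange idx (l.length : Int) 1).map g
      = s :: (PySem.List.pyRange (idx + 1) (l.length : Int) 1).map g := by
    rw [PySem.List.pyRange_one_cons h2]; simp [hg, hs]
  set t := (PySem.List.pyRange (idx + 1) (l.length : Int) 1).map g with ht
  rw [hseq]
  have hhead : PySem.List.pyGetD (s :: t) 0 0 = s := PySem.List.pyGetD_zero_cons s t 0
  rw [hhead]
  have hAstep : gstep ([s], s) s = ([s], s) := by simp [gstep]
  rw [List.foldl_cons, hAstep, greedy_eq]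
  have hpm : ((s :: t).foldl (fun (a : List Int × Int) x =>
      (a.1 ++ [max a.2 x], max a.2 x)) ([], s)).1 = s :: pms t s := by
    rw [List.foldl_cons, pm_fold]; simp
  rw [hpm]
  simp

-- ===== VERDICT (by name: the statement is the Claim_ definition above) =====
theorem get_list_from_low_spec : Claim_equal_get_list_from_low := by
  intro l idx _ hpre
  obtain ⟨h1, h2⟩ := hpre
  exact main_eq l idx h1 h2
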